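-- pv_equiv track=rewrite | github.com/Shashank0701-byte/Neuro-ai | backend/scripts/nlp_analyzer.py | _detect_repetitions
-- ===== SOURCE A (Python) =====
-- def _detect_repetitions(word_sequence):
--     """Detect word and phrase repetitions"""
--     repetitions = {'immediate': 0, 'near': 0}
--
--     for i in range(len(word_sequence) - 1):
--         if word_sequence[i] == word_sequence[i + 1]:
--             repetitions['immediate'] += 1
--
--         # Check for repetitions within 3 words
--         for j in range(i + 2, min(i + 4, len(word_sequence))):
--             if word_sequence[i] == word_sequence[j]:
--                 repetitions['near'] += 1
--
--     return repetitions
-- ===== SOURCE B (Python) =====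
-- def _detect_repetitions(word_sequence):
--     """Detect word and phrase repetitions via a positions index: group the
--     occurrence positions of each word, then count close pairs (gap 1 =
--     immediate, gap 2 or 3 = near) inside each word's position list."""
--     positions = {}
--     for i, w in enumerate(word_sequence):
--         positions.setdefault(w, []).append(i)
--     immediate = near = 0
--     for ps in positions.values():
--         for k, p in enumerate(ps):
--             # positions are strictly increasing, so only the next 3 can be within gap 3
--             for q in ps[k + 1:k + 4]:
--                 if q - p == 1:
--                     immediate += 1
--                 elif q - p <= 3:
--                     near += 1
--     return {'immediate': immediate, 'near': near}
-- ===== Notes on version B (the rewrite author's own statement) =====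
-- stated objective: alternative
-- what changed: A scans positions left to right comparing each word with a forward window; B first builds a dict index from each word to its occurrence-position list, then counts close position pairs (gap 1 = immediate, gap 2/3 = near) inside each word's list.
import Mathlib
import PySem

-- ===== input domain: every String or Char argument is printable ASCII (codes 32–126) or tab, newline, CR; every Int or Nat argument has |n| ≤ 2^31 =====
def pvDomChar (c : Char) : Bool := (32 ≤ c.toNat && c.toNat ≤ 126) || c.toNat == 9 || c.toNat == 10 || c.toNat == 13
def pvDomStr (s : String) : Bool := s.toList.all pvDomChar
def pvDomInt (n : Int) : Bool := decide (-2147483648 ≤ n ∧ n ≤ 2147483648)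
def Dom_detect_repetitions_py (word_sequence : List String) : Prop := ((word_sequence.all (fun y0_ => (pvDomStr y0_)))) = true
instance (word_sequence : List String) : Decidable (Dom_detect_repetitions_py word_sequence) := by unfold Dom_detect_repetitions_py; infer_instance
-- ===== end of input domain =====

-- B replaces A's left-to-right window scan by a positions index: a dict from each word to its
-- occurrence-position list, then counting close position pairs inside each word's list.

-- ===== PORT A =====
-- indices i, i+1 and j are always in range inside the loops, so pyGetD with "" is exact for word_sequence[…]
def detect_repetitions_py (word_sequence : List String) : List (String × Int) :=
  let repetitions : PySem.Dict String Int := PySem.Dict.mk [("immediate", 0), ("near", 0)]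
  let n : Int := (word_sequence.length : Int)
  let repetitions :=
    (PySem.List.pyRange 0 (n - 1) 1).foldl (fun reps i =>
      let reps :=
        if PySem.List.pyGetD word_sequence i "" = PySem.List.pyGetD word_sequence (i + 1) "" then
          PySem.Dict.modify reps "immediate" 0 (· + 1)
        else reps
      (PySem.List.pyRange (i + 2) (min (i + 4) n) 1).foldl (fun reps j =>
        if PySem.List.pyGetD word_sequence i "" = PySem.List.pyGetD word_sequence j "" then
          PySem.Dict.modify reps "near" 0 (· + 1)
        else reps) reps) repetitions
  repetitions.items

-- ===== PORT B =====
def detect_repetitions_py_alt (word_sequence : List String) : List (String × Int) :=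
  let positions : PySem.Dict String (List Int) :=
    (PySem.List.enumerate word_sequence 0).foldl
      (fun d p => d.modify p.2 [] (fun l => l ++ [p.1])) PySem.Dict.empty
  let counts : Int × Int :=
    positions.values.foldl (fun acc ps =>
      (PySem.List.enumerate ps 0).foldl (fun acc kp =>
        (PySem.List.slice ps (some (kp.1 + 1)) (some (kp.1 + 4))).foldl (fun acc q =>
          if q - kp.2 = 1 then (acc.1 + 1, acc.2)
          else if q - kp.2 ≤ 3 then (acc.1, acc.2 + 1)
          else acc) acc) acc) ((0 : Int), (0 : Int))
  [("immediate", counts.1), ("near", counts.2)]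

-- ===== PRECONDITION & SPEC =====
def Spec_detect_repetitions_py (word_sequence : List String) (out : List (String × Int)) : Prop := out = detect_repetitions_py_alt word_sequence
instance (word_sequence : List String) (out : List (String × Int)) : Decidable (Spec_detect_repetitions_py word_sequence out) := by unfold Spec_detect_repetitions_py; infer_instance

-- ===== CLAIM (what is proved, stated in full; the proofs are below) =====
def Claim_equal_detect_repetitions_py : Prop := ∀ (word_sequence : List String), Dom_detect_repetitions_py word_sequence → Spec_detect_repetitions_py word_sequence (detect_repetitions_py word_sequence)

-- ===== LEMMAS AND PROOFS =====

-- the inner-loop / outer-loop per-step contributions of A, as pure values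
def pvStepImm (ws : List String) (i : Int) : Int :=
  if PySem.List.pyGetD ws i "" = PySem.List.pyGetD ws (i + 1) "" then 1 else 0

def pvStepNear (ws : List String) (i : Int) : Int :=
  ((PySem.List.pyRange (i + 2) (min (i + 4) (ws.length : Int)) 1).map
    (fun j => if PySem.List.pyGetD ws i "" = PySem.List.pyGetD ws j "" then (1 : Int) else 0)).sum

-- index-range form of the distance-d match count: the common normal form of both programs
def pvRC (ws : List String) (d : Nat) : Nat :=
  (List.range (ws.length - d)).countP (fun k => ws.getD k "" == ws.getD (k + d) "")

-- B's per-word occurrence-position list, in index-range form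
def pvP (ws : List String) (w : String) : List Int :=
  (PySem.List.pyRange 0 (ws.length : Int) 1).filter (fun j => PySem.List.pyGetD ws j "" == w)

-- B's inner loop over a candidate window, as a function
def pvBody (acc : Int × Int) (p : Int) (l : List Int) : Int × Int :=
  l.foldl (fun acc q =>
    if q - p = 1 then (acc.1 + 1, acc.2)
    else if q - p ≤ 3 then (acc.1, acc.2 + 1)
    else acc) acc

-- B's per-group loop as structural recursion on the position list's tails
def pvGo (ps : List Int) (acc : Int × Int) : Int × Int :=
  match ps with
  | [] => acc
  | p :: rest => pvGo rest (pvBody acc p (rest.take 3))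

theorem pv_inner_fold (ws : List String) (i : Int) (js : List Int) (a b : Int) :
    js.foldl (fun reps j =>
      if PySem.List.pyGetD ws i "" = PySem.List.pyGetD ws j "" then
        PySem.Dict.modify reps "near" 0 (· + 1)
      else reps) (PySem.Dict.mk [("immediate", a), ("near", b)])
    = PySem.Dict.mk [("immediate", a), ("near",
        b + (js.map (fun j => if PySem.List.pyGetD ws i "" = PySem.List.pyGetD ws j "" then (1 : Int) else 0)).sum)] := by
  induction js generalizing b with
  | nil => simp
  | cons j js ih =>
    simp only [List.foldl_cons, List.map_cons, List.sum_cons]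
    by_cases h : PySem.List.pyGetD ws i "" = PySem.List.pyGetD ws j ""
    · rw [if_pos h,
        show PySem.Dict.modify (PySem.Dict.mk [("immediate", a), ("near", b)]) "near" 0 (· + 1)
          = PySem.Dict.mk [("immediate", a), ("near", b + 1)] by
            simp [PySem.Dict.modify, PySem.Dict.insert, PySem.Dict.getD, PySem.Dict.get?],
        ih, if_pos h]
      ring_nf
    · rw [if_neg h, ih, if_neg h]
      ring_nf

theorem pv_outer_fold (ws : List String) (l : List Int) (a b : Int) :
    l.foldl (fun reps i =>
      let reps :=
        if PySem.List.pyGetD ws i "" = PySem.List.pyGetD ws (i + 1) "" then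
          PySem.Dict.modify reps "immediate" 0 (· + 1)
        else reps
      (PySem.List.pyRange (i + 2) (min (i + 4) (ws.length : Int)) 1).foldl (fun reps j =>
        if PySem.List.pyGetD ws i "" = PySem.List.pyGetD ws j "" then
          PySem.Dict.modify reps "near" 0 (· + 1)
        else reps) reps) (PySem.Dict.mk [("immediate", a), ("near", b)])
    = PySem.Dict.mk [("immediate", a + (l.map (pvStepImm ws)).sum),
                     ("near", b + (l.map (pvStepNear ws)).sum)] := by
  induction l generalizing a b with
  | nil => simp
  | cons i l ih =>
    simp only [List.foldl_cons, List.map_cons, List.sum_cons]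
    by_cases h : PySem.List.pyGetD ws i "" = PySem.List.pyGetD ws (i + 1) ""
    · rw [show (if PySem.List.pyGetD ws i "" = PySem.List.pyGetD ws (i + 1) "" then
            PySem.Dict.modify (PySem.Dict.mk [("immediate", a), ("near", b)]) "immediate" 0 (· + 1)
          else (PySem.Dict.mk [("immediate", a), ("near", b)]))
          = PySem.Dict.mk [("immediate", a + 1), ("near", b)] by
        simp [h, PySem.Dict.modify, PySem.Dict.insert, PySem.Dict.getD, PySem.Dict.get?]]
      rw [pv_inner_fold, ih]
      simp only [pvStepImm, pvStepNear, h, if_pos]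
      ring_nf
    · rw [show (if PySem.List.pyGetD ws i "" = PySem.List.pyGetD ws (i + 1) "" then
            PySem.Dict.modify (PySem.Dict.mk [("immediate", a), ("near", b)]) "immediate" 0 (· + 1)
          else (PySem.Dict.mk [("immediate", a), ("near", b)]))
          = PySem.Dict.mk [("immediate", a), ("near", b)] by simp [h]]
      rw [pv_inner_fold, ih]
      simp only [pvStepImm, pvStepNear, h, if_false]
      ring_nf

-- a guarded sum over range m equals the unguarded sum over range c (c ≤ m)
theorem pv_sum_guard (f : Nat → Int) (c m : Nat) (h : c ≤ m) :
    ((List.range m).map (fun k => if k < c then f k else 0)).sum = ((List.range c).map f).sum := by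
  induction m with
  | zero =>
    have : c = 0 := by omega
    simp [this]
  | succ m ih =>
    by_cases hc : c ≤ m
    · rw [List.range_succ, List.map_append, List.sum_append, ih hc]
      simp [show ¬ m < c by omega]
    · have : c = m + 1 := by omega
      subst this
      apply congrArg
      apply List.map_congr_left
      intro k hk
      simp [List.mem_range.mp hk]

-- A in the common normal form
theorem pv_A_eq (ws : List String) :
    detect_repetitions_py ws
      = [("immediate", (pvRC ws 1 : Int)), ("near", (pvRC ws 2 : Int) + (pvRC ws 3 : Int))] := by
  rcases ws with _ | ⟨w, t⟩
  · decide
  · set ws := w :: t with hws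
    rw [show detect_repetitions_py ws
        = (List.foldl
            (fun reps i =>
              let reps :=
                if PySem.List.pyGetD ws i "" = PySem.List.pyGetD ws (i + 1) "" then
                  PySem.Dict.modify reps "immediate" 0 (· + 1)
                else reps
              (PySem.List.pyRange (i + 2) (min (i + 4) (ws.length : Int)) 1).foldl (fun reps j =>
                if PySem.List.pyGetD ws i "" = PySem.List.pyGetD ws j "" then
                  PySem.Dict.modify reps "near" 0 (· + 1)
                else reps) reps)
            (PySem.Dict.mk [("immediate", 0), ("near", 0)])
            (PySem.List.pyRange 0 ((ws.length : Int) - 1) 1)).items from rfl]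
    have hm : ((ws.length : Int) - 1) = ((t.length : Nat) : Int) := by
      rw [hws]; push_cast [List.length_cons]; ring
    rw [hm, PySem.List.pyRange_zero_natCast, pv_outer_fold]
    set m := t.length with hmdef
    have hn : ws.length = m + 1 := by simp [hws, hmdef]
    -- immediate sum
    have hImm : ((List.map (fun k : Nat => (k : Int)) (List.range m)).map (pvStepImm ws)).sum
        = (pvRC ws 1 : Int) := by
      rw [List.map_map]
      have hcong : ∀ k ∈ List.range m, (pvStepImm ws ∘ fun k : Nat => (k : Int)) k
          = (fun k : Nat => if (ws.getD k "" == ws.getD (k + 1) "") = true then (1:Int) else 0) k := by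
        intro k _
        simp only [Function.comp_apply, pvStepImm]
        rw [show ((k : Int) + 1) = ((k + 1 : Nat) : Int) by push_cast; ring,
            PySem.List.pyGetD_natCast, PySem.List.pyGetD_natCast]
        simp [beq_iff_eq]
      rw [List.map_congr_left hcong, PySem.List.sum_map_ite_one_zero]
      unfold pvRC
      rw [hn]
      norm_num
    -- near sum
    have hStepNear : ∀ k, k < m → pvStepNear ws (k : Int)
        = (if k + 2 < m + 1 then (if ws.getD k "" == ws.getD (k + 2) "" then (1:Int) else 0) else 0)
        + (if k + 3 < m + 1 then (if ws.getD k "" == ws.getD (k + 3) "" then (1:Int) else 0) else 0) := by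
      intro k hk
      unfold pvStepNear
      rw [hn]
      have e2 : ((k : Int) + 2) = ((k + 2 : Nat) : Int) := by push_cast; ring
      have e3 : ((k : Int) + 3) = ((k + 3 : Nat) : Int) := by push_cast; ring
      by_cases h2 : k + 2 < m + 1
      · by_cases h3 : k + 3 < m + 1
        · -- two inner iterations
          rw [PySem.List.pyRange_one_cons (by push_cast; omega :
                (k : Int) + 2 < min ((k : Int) + 4) (((m + 1 : Nat) : Nat) : Int))]
          rw [show ((k : Int) + 2 + 1) = (k : Int) + 3 by ring]
          rw [PySem.List.pyRange_one_cons (by push_cast; omega :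
                (k : Int) + 3 < min ((k : Int) + 4) (((m + 1 : Nat) : Nat) : Int))]
          rw [show ((k : Int) + 3 + 1) = (k : Int) + 4 by ring]
          rw [PySem.List.pyRange_one_eq_nil (by push_cast; omega :
                min ((k : Int) + 4) (((m + 1 : Nat) : Nat) : Int) ≤ (k : Int) + 4)]
          simp only [List.map_cons, List.map_nil, List.sum_cons, List.sum_nil, add_zero]
          rw [e2, e3, PySem.List.pyGetD_natCast, PySem.List.pyGetD_natCast,
              PySem.List.pyGetD_natCast]
          simp [h2, h3, beq_iff_eq]
        · -- one inner iteration
          rw [PySem.List.pyRange_one_cons (by push_cast; omega :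
                (k : Int) + 2 < min ((k : Int) + 4) (((m + 1 : Nat) : Nat) : Int))]
          rw [PySem.List.pyRange_one_eq_nil (by push_cast; omega :
                min ((k : Int) + 4) (((m + 1 : Nat) : Nat) : Int) ≤ (k : Int) + 2 + 1)]
          simp only [List.map_cons, List.map_nil, List.sum_cons, List.sum_nil, add_zero]
          rw [e2, PySem.List.pyGetD_natCast, PySem.List.pyGetD_natCast]
          simp [h2, h3, beq_iff_eq]
      · -- empty inner range
        have h3 : ¬ k + 3 < m + 1 := by omega
        rw [PySem.List.pyRange_one_eq_nil (by push_cast; omega :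
              min ((k : Int) + 4) (((m + 1 : Nat) : Nat) : Int) ≤ (k : Int) + 2)]
        simp [h2, h3]
    have hNear : ((List.map (fun k : Nat => (k : Int)) (List.range m)).map (pvStepNear ws)).sum
        = (pvRC ws 2 : Int) + (pvRC ws 3 : Int) := by
      rw [List.map_map]
      have hcong : ∀ k ∈ List.range m, (pvStepNear ws ∘ fun k : Nat => (k : Int)) k
          = (fun k : Nat =>
              (if k + 2 < m + 1 then (if ws.getD k "" == ws.getD (k + 2) "" then (1:Int) else 0) else 0)
            + (if k + 3 < m + 1 then (if ws.getD k "" == ws.getD (k + 3) "" then (1:Int) else 0) else 0)) k := by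
        intro k hk
        exact hStepNear k (List.mem_range.mp hk)
      rw [List.map_congr_left hcong, PySem.List.sum_map_add_int]
      have g2 : ((List.range m).map (fun k : Nat =>
          if k + 2 < m + 1 then (if ws.getD k "" == ws.getD (k + 2) "" then (1:Int) else 0) else 0)).sum
          = (pvRC ws 2 : Int) := by
        have hg := pv_sum_guard (fun k : Nat => if ws.getD k "" == ws.getD (k + 2) "" then (1:Int) else 0)
          (m - 1) m (by omega)
        rw [show ((List.range m).map (fun k : Nat =>
              if k + 2 < m + 1 then (if ws.getD k "" == ws.getD (k + 2) "" then (1:Int) else 0) else 0))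
            = ((List.range m).map (fun k : Nat =>
              if k < m - 1 then (if ws.getD k "" == ws.getD (k + 2) "" then (1:Int) else 0) else 0)) by
          apply List.map_congr_left; intro k hk
          have := List.mem_range.mp hk
          by_cases h : k + 2 < m + 1 <;> simp [h, show ¬ (k + 2 < m + 1) → ¬ (k < m - 1) by omega,
            show (k + 2 < m + 1) → (k < m - 1) by omega]]
        rw [hg, PySem.List.sum_map_ite_one_zero]
        unfold pvRC
        rw [hn, show m + 1 - 2 = m - 1 by omega]
      have g3 : ((List.range m).map (fun k : Nat =>
          if k + 3 < m + 1 then (if ws.getD k "" == ws.getD (k + 3) "" then (1:Int) else 0) else 0)).sum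
          = (pvRC ws 3 : Int) := by
        have hg := pv_sum_guard (fun k : Nat => if ws.getD k "" == ws.getD (k + 3) "" then (1:Int) else 0)
          (m - 2) m (by omega)
        rw [show ((List.range m).map (fun k : Nat =>
              if k + 3 < m + 1 then (if ws.getD k "" == ws.getD (k + 3) "" then (1:Int) else 0) else 0))
            = ((List.range m).map (fun k : Nat =>
              if k < m - 2 then (if ws.getD k "" == ws.getD (k + 3) "" then (1:Int) else 0) else 0)) by
          apply List.map_congr_left; intro k hk
          have := List.mem_range.mp hk
          by_cases h : k + 3 < m + 1 <;> simp [h, show ¬ (k + 3 < m + 1) → ¬ (k < m - 2) by omega,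
            show (k + 3 < m + 1) → (k < m - 2) by omega]]
        rw [hg, PySem.List.sum_map_ite_one_zero]
        unfold pvRC
        rw [hn, show m + 1 - 3 = m - 2 by omega]
      rw [g2, g3]
    rw [hImm, hNear]
    simp

-- ===== B-side lemmas =====

-- sum over a filtered list as a guarded sum over the whole list
theorem pv_sum_filter {α : Type} (l : List α) (q : α → Bool) (g : α → Int) :
    ((l.filter q).map g).sum = (l.map (fun x => if q x then g x else 0)).sum := by
  induction l with
  | nil => simp
  | cons x l ih =>
    by_cases h : q x <;> simp [h, ih]

-- exchanging two finite sums
theorem pv_sum_swap {α β : Type} (D : List α) (R : List β) (h : α → β → Int) :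
    (D.map (fun w => (R.map (h w)).sum)).sum = (R.map (fun p => (D.map (fun w => h w p)).sum)).sum := by
  induction D with
  | nil => simp
  | cons w D ih =>
    simp only [List.map_cons, List.sum_cons, ih]
    rw [← PySem.List.sum_map_add_int]

theorem pv_enum_slice (full : List Int) (t : List Int) (j : Nat) (acc : Int × Int)
    (h : full.drop j = t) :
    (PySem.List.enumerate t (j : Int)).foldl (fun acc kp =>
      (PySem.List.slice full (some (kp.1 + 1)) (some (kp.1 + 4))).foldl (fun acc q =>
        if q - kp.2 = 1 then (acc.1 + 1, acc.2)
        else if q - kp.2 ≤ 3 then (acc.1, acc.2 + 1)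
        else acc) acc) acc
    = pvGo t acc := by
  induction t generalizing j acc with
  | nil => simp [pvGo, PySem.List.enumerate]
  | cons p rest ih =>
    rw [PySem.List.enumerate_cons]
    simp only [List.foldl_cons]
    have hd : full.drop (j+1) = rest := by
      rw [← List.tail_drop, h, List.tail_cons]
    have e1 : ((j:Int) + 1) = ((j+1 : Nat) : Int) := by push_cast; ring
    have e4 : ((j:Int) + 4) = ((j+4 : Nat) : Int) := by push_cast; ring
    have hslice : PySem.List.slice full (some ((j:Int) + 1)) (some ((j:Int) + 4)) = rest.take 3 := by
      rw [e1, e4, PySem.List.slice_natCast, hd]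
      congr 1
      omega
    rw [e1, ih (j+1) _ hd]
    rw [show pvGo (p :: rest) acc = pvGo rest (pvBody acc p (rest.take 3)) from rfl]
    congr 1
    rw [← e1, hslice]
    rfl

theorem pv_mem_take3 (p : Int) (rest : List Int) (hr : rest.Pairwise (· < ·))
    (hgt : ∀ x ∈ rest, p < x) (m : Int) (hm : m ≤ p + 3) (hmem : m ∈ rest) :
    m ∈ rest.take 3 := by
  match rest with
  | [] => simp at hmem
  | [a] => simpa using hmem
  | [a, b] => simpa using hmem
  | [a, b, c] => simpa using hmem
  | a :: b :: c :: d :: rest' =>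
    have hab : a < b := by simp [List.pairwise_cons] at hr; tauto
    have hbc : b < c := by simp [List.pairwise_cons] at hr; tauto
    have hpa : p < a := hgt a (by simp)
    rcases List.mem_cons.mp hmem with rfl | hmem1
    · simp
    rcases List.mem_cons.mp hmem1 with rfl | hmem2
    · simp
    rcases List.mem_cons.mp hmem2 with rfl | hmem3
    · simp
    -- m ∈ d :: rest', but every such element exceeds c > b > a > p, so m ≥ p + 4
    exfalso
    have hcm : c < m := by
      have := List.pairwise_cons.mp (List.pairwise_cons.mp (List.pairwise_cons.mp hr).2).2
      exact this.1 m hmem3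
    omega

theorem pv_body_eq (p : Int) (T : List Int) (hnd : T.Nodup) (hgt : ∀ q ∈ T, p < q) (a b : Int) :
    pvBody (a, b) p T
      = (a + (if p + 1 ∈ T then (1:Int) else 0),
         b + (if p + 2 ∈ T then (1:Int) else 0) + (if p + 3 ∈ T then (1:Int) else 0)) := by
  induction T generalizing a b with
  | nil => simp [pvBody]
  | cons q T ih =>
    have hndT : T.Nodup := (List.nodup_cons.mp hnd).2
    have hqT : q ∉ T := (List.nodup_cons.mp hnd).1
    have hgtT : ∀ x ∈ T, p < x := fun x hx => hgt x (List.mem_cons_of_mem _ hx)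
    have hpq : p < q := hgt q (List.mem_cons_self ..)
    rw [show pvBody (a, b) p (q :: T)
        = pvBody (if q - p = 1 then (a + 1, b) else if q - p ≤ 3 then (a, b + 1) else (a, b)) p T by
      simp only [pvBody, List.foldl_cons]]
    by_cases h1 : q = p + 1
    · rw [if_pos (by omega)]
      rw [ih hndT hgtT]
      have : p + 1 ∉ T := h1 ▸ hqT
      simp [List.mem_cons, this, h1]
      try ring
    · by_cases h2 : q = p + 2
      · rw [if_neg (by omega), if_pos (by omega), ih hndT hgtT]
        have : p + 2 ∉ T := h2 ▸ hqT
        simp [List.mem_cons, this, h2]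
        try ring
      · by_cases h3 : q = p + 3
        · rw [if_neg (by omega), if_pos (by omega), ih hndT hgtT]
          have : p + 3 ∉ T := h3 ▸ hqT
          simp [List.mem_cons, this, h3]
          try ring
        · rw [if_neg (by omega), if_neg (by omega), ih hndT hgtT]
          simp [List.mem_cons, show p + 1 ≠ q by omega, show p + 2 ≠ q by omega,
            show p + 3 ≠ q by omega]

theorem pv_go_eq (L : List Int) (hL : L.Pairwise (· < ·)) : ∀ (a b : Int),
    pvGo L (a, b)
      = (a + (L.map (fun p => if p + 1 ∈ L then (1:Int) else 0)).sum,
         b + (L.map (fun p =>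
            (if p + 2 ∈ L then (1:Int) else 0) + (if p + 3 ∈ L then (1:Int) else 0))).sum) := by
  induction L with
  | nil => intro a b; simp [pvGo]
  | cons p rest ih =>
    intro a b
    have hgt : ∀ x ∈ rest, p < x := (List.pairwise_cons.mp hL).1
    have hrest : rest.Pairwise (· < ·) := (List.pairwise_cons.mp hL).2
    have hndrest : rest.Nodup := hrest.imp (fun h => ne_of_lt h)
    have hndT : (rest.take 3).Nodup := ((List.take_sublist 3 rest).nodup hndrest)
    have hgtT : ∀ q ∈ rest.take 3, p < q := fun q hq => hgt q (List.mem_of_mem_take hq)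
    -- membership in the 3-window ↔ membership in the whole list, for p+1, p+2, p+3
    have hw : ∀ d : Int, 1 ≤ d → d ≤ 3 → ((p + d ∈ rest.take 3) ↔ (p + d ∈ p :: rest)) := by
      intro d h1 h3
      constructor
      · intro h; exact List.mem_cons_of_mem _ (List.mem_of_mem_take h)
      · intro h
        rcases List.mem_cons.mp h with h | h
        · omega
        · exact pv_mem_take3 p rest hrest hgt _ (by omega) h
    rw [show pvGo (p :: rest) (a, b) = pvGo rest (pvBody (a, b) p (rest.take 3)) from rfl,
        pv_body_eq p (rest.take 3) hndT hgtT a b, ih hrest]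
    have m1 := hw 1 (by omega) (by omega)
    have m2 := hw 2 (by omega) (by omega)
    have m3 := hw 3 (by omega) (by omega)
    -- rewrite the tail indicators from rest to p :: rest
    have hcong1 : ∀ x ∈ rest, (if x + 1 ∈ rest then (1:Int) else 0)
        = (if x + 1 ∈ p :: rest then (1:Int) else 0) := by
      intro x hx
      have : x + 1 ≠ p := by have := hgt x hx; omega
      simp [List.mem_cons, this]
    have hcong23 : ∀ x ∈ rest,
        ((if x + 2 ∈ rest then (1:Int) else 0) + (if x + 3 ∈ rest then (1:Int) else 0))
        = ((if x + 2 ∈ p :: rest then (1:Int) else 0) + (if x + 3 ∈ p :: rest then (1:Int) else 0)) := by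
      intro x hx
      have h2 : x + 2 ≠ p := by have := hgt x hx; omega
      have h3 : x + 3 ≠ p := by have := hgt x hx; omega
      simp [List.mem_cons, h2, h3]
    rw [List.map_congr_left hcong1, List.map_congr_left hcong23] at *
    simp only [List.map_cons, List.sum_cons]
    simp only [m1, m2, m3]
    rw [Prod.mk.injEq]
    constructor <;> ring

theorem pv_groups (ws : List String) :
    ((PySem.List.enumerate ws 0).foldl
      (fun d p => d.modify p.2 [] (fun l => l ++ [p.1])) PySem.Dict.empty).values
    = (PySem.Set.ofList ws).map (pvP ws) := by
  set d := (PySem.List.enumerate ws 0).foldl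
      (fun d p => d.modify p.2 [] (fun l => l ++ [p.1])) PySem.Dict.empty with hd
  have hkeys : d.keys = PySem.Set.ofList ws := by
    rw [hd, PySem.Dict.keys_foldl_modify_key]
    rw [PySem.Dict.keys_empty, PySem.Set.update_nil_left, PySem.List.map_snd_enumerate]
  have hnd : d.keys.Nodup := by rw [hkeys]; exact PySem.Set.nodup_ofList ws
  rw [PySem.Dict.values_eq_map_keys d hnd [], hkeys]
  apply List.map_congr_left
  intro w hw
  have hswap : d = ((PySem.List.enumerate ws 0).map Prod.swap).foldl
      (fun d p => d.modify p.1 [] (fun l => l ++ [p.2])) PySem.Dict.empty := by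
    rw [List.foldl_map]
    rfl
  rw [hswap, PySem.Dict.getD_foldl_modify_append]
  rw [PySem.Dict.getD_empty, List.nil_append]
  rw [List.filter_map, List.map_map]
  rw [PySem.List.enumerate_eq_map_pyRange ws ""]
  rw [List.filter_map, List.map_map]
  unfold pvP
  simp [Function.comp_def]

theorem pv_sum_single (D : List String) (hnd : D.Nodup) (c : String) (hc : c ∈ D) (G : String → Int) :
    (D.map (fun w => if c == w then G w else 0)).sum = G c := by
  induction D with
  | nil => simp at hc
  | cons w D ih =>
    rcases List.mem_cons.mp hc with h | h
    · subst h
      have hz : ∀ x ∈ D, (if c == x then G x else 0) = 0 := by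
        intro x hx
        have : c ≠ x := by rintro rfl; exact (List.nodup_cons.mp hnd).1 hx
        simp [this]
      rw [List.map_cons, List.sum_cons, List.map_congr_left hz]
      simp
    · have hne : c ≠ w := by rintro rfl; exact (List.nodup_cons.mp hnd).1 h
      simp only [List.map_cons, List.sum_cons]
      rw [ih (List.nodup_cons.mp hnd).2 h]
      simp [hne]

theorem pv_mem_pvP (ws : List String) (w : String) (q : Int) :
    q ∈ pvP ws w ↔ (0 ≤ q ∧ q < (ws.length : Int) ∧ PySem.List.pyGetD ws q "" == w) := by
  unfold pvP
  rw [List.mem_filter, PySem.List.mem_pyRange_one]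
  tauto

theorem pv_sum_d (ws : List String) (d : Nat) :
    ((PySem.Set.ofList ws).map (fun w =>
        ((pvP ws w).map (fun p => if p + (d : Int) ∈ pvP ws w then (1:Int) else 0)).sum)).sum
      = (pvRC ws d : Int) := by
  set n := ws.length with hn
  -- rewrite the inner indicator through the membership characterisation
  have h1 : ∀ w, ((pvP ws w).map (fun p => if p + (d : Int) ∈ pvP ws w then (1:Int) else 0)).sum
      = ((pvP ws w).map (fun p =>
          if (p + (d:Int) < (n:Int) ∧ PySem.List.pyGetD ws (p + (d:Int)) "" == w) then (1:Int) else 0)).sum := by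
    intro w
    apply congrArg
    apply List.map_congr_left
    intro p hp
    have hp0 : 0 ≤ p := ((pv_mem_pvP ws w p).mp hp).1
    simp only [pv_mem_pvP]
    have hd0 : (0 ≤ p + (d:Int)) := by positivity
    simp [hd0]
    rw [hn]
  simp only [h1]
  -- open the filter defining pvP and push the guard into the sum
  have h2 : ∀ w, ((pvP ws w).map (fun p =>
          if (p + (d:Int) < (n:Int) ∧ PySem.List.pyGetD ws (p + (d:Int)) "" == w) then (1:Int) else 0)).sum
      = ((PySem.List.pyRange 0 (n : Int) 1).map (fun p =>
          if PySem.List.pyGetD ws p "" == w then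
            (if (p + (d:Int) < (n:Int) ∧ PySem.List.pyGetD ws (p + (d:Int)) "" == w) then (1:Int) else 0)
          else 0)).sum := by
    intro w
    unfold pvP
    rw [pv_sum_filter]
  simp only [h2]
  -- exchange the two sums and collapse the inner one over the distinct words
  rw [pv_sum_swap]
  have h3 : ∀ p ∈ PySem.List.pyRange 0 (n : Int) 1,
      ((PySem.Set.ofList ws).map (fun w =>
        if PySem.List.pyGetD ws p "" == w then
          (if (p + (d:Int) < (n:Int) ∧ PySem.List.pyGetD ws (p + (d:Int)) "" == w) then (1:Int) else 0)
        else 0)).sum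
      = (if (p + (d:Int) < (n:Int) ∧ PySem.List.pyGetD ws (p + (d:Int)) "" == PySem.List.pyGetD ws p "") then (1:Int) else 0) := by
    intro p hp
    have hpr := PySem.List.mem_pyRange_one.mp hp
    have hmem : PySem.List.pyGetD ws p "" ∈ ws := by
      have hlt : p.toNat < ws.length := by omega
      rw [PySem.List.pyGetD_of_nonneg]
      · rw [List.getD_eq_getElem _ _ hlt]
        exact List.getElem_mem hlt
      · exact hpr.1
    exact pv_sum_single (PySem.Set.ofList ws) (PySem.Set.nodup_ofList ws)
      (PySem.List.pyGetD ws p "") ((PySem.Set.mem_ofList _ _).mpr hmem)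
      (fun w => if (p + (d:Int) < (n:Int) ∧ PySem.List.pyGetD ws (p + (d:Int)) "" == w) then (1:Int) else 0)
  rw [List.map_congr_left h3]
  -- now a single guarded sum over the index range
  rw [PySem.List.pyRange_zero_natCast, List.map_map]
  have h4 : ∀ k ∈ List.range n,
      ((fun p => if (p + (d:Int) < (n:Int) ∧ PySem.List.pyGetD ws (p + (d:Int)) "" == PySem.List.pyGetD ws p "") then (1:Int) else 0) ∘ (fun k : Nat => (k : Int))) k
      = (fun k : Nat => if k < n - d then (if ws.getD (k + d) "" == ws.getD k "" then (1:Int) else 0) else 0) k := by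
    intro k hk
    simp only [Function.comp_apply]
    rw [show ((k : Int) + (d:Int)) = (((k + d : Nat)) : Int) by push_cast; ring,
        PySem.List.pyGetD_natCast, PySem.List.pyGetD_natCast]
    by_cases h : k + d < n
    · have h' : k < n - d := by omega
      have hcl : ((k:Int) + (d:Int) < (n:Int)) := by omega
      simp [hcl, h']
    · have h' : ¬ k < n - d := by omega
      have hcl : ¬ ((k:Int) + (d:Int) < (n:Int)) := by omega
      simp [hcl, h']
  rw [List.map_congr_left h4, pv_sum_guard _ (n - d) n (by omega), PySem.List.sum_map_ite_one_zero]
  unfold pvRC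
  congr 1
  apply List.countP_congr
  intro k _
  simp [beq_iff_eq]
  constructor <;> (intro h; exact h.symm)

theorem pv_pairwise_pvP (ws : List String) (w : String) : (pvP ws w).Pairwise (· < ·) :=
  (PySem.List.pairwise_lt_pyRange_one 0 (ws.length : Int)).filter _

theorem pv_B_eq (ws : List String) :
    detect_repetitions_py_alt ws
      = [("immediate", (pvRC ws 1 : Int)), ("near", (pvRC ws 2 : Int) + (pvRC ws 3 : Int))] := by
  simp only [detect_repetitions_py_alt]
  rw [pv_groups]
  show (let counts : Int × Int :=
      (List.map (pvP ws) (PySem.Set.ofList ws)).foldl (fun acc ps =>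
        (PySem.List.enumerate ps 0).foldl (fun acc kp =>
          (PySem.List.slice ps (some (kp.1 + 1)) (some (kp.1 + 4))).foldl (fun acc q =>
            if q - kp.2 = 1 then (acc.1 + 1, acc.2)
            else if q - kp.2 ≤ 3 then (acc.1, acc.2 + 1)
            else acc) acc) acc) ((0 : Int), (0 : Int))
    [("immediate", counts.1), ("near", counts.2)])
    = [("immediate", (pvRC ws 1 : Int)), ("near", (pvRC ws 2 : Int) + (pvRC ws 3 : Int))]
  simp only []
  -- step 1: each per-group enumerate-and-slice loop is pvGo on that group
  rw [PySem.List.foldl_congr_mem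
    (f := fun (acc : Int × Int) (ps : List Int) =>
      (PySem.List.enumerate ps 0).foldl (fun acc kp =>
        (PySem.List.slice ps (some (kp.1 + 1)) (some (kp.1 + 4))).foldl (fun acc q =>
          if q - kp.2 = 1 then (acc.1 + 1, acc.2)
          else if q - kp.2 ≤ 3 then (acc.1, acc.2 + 1)
          else acc) acc) acc)
    (g := fun (acc : Int × Int) (ps : List Int) => pvGo ps acc)
    (l := List.map (pvP ws) (PySem.Set.ofList ws))
    (init := ((0 : Int), (0 : Int)))
    (by
      intro acc ps _
      have h := pv_enum_slice ps ps 0 acc (by simp)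
      rw [Nat.cast_zero] at h
      exact h)]
  -- step 2: fold over the mapped groups is a fold over the distinct words
  simp only [List.foldl_map]
  -- step 3: evaluate pvGo on each (strictly increasing) group
  rw [PySem.List.foldl_congr_mem
    (f := fun (acc : Int × Int) (w : String) => pvGo (pvP ws w) acc)
    (g := fun (acc : Int × Int) (w : String) =>
      (acc.1 + ((pvP ws w).map (fun p => if p + 1 ∈ pvP ws w then (1:Int) else 0)).sum,
       acc.2 + ((pvP ws w).map (fun p =>
          (if p + 2 ∈ pvP ws w then (1:Int) else 0) + (if p + 3 ∈ pvP ws w then (1:Int) else 0))).sum))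
    (l := PySem.Set.ofList ws)
    (init := ((0 : Int), (0 : Int)))
    (by
      intro acc w _
      obtain ⟨a, b⟩ := acc
      simp only [pv_go_eq (pvP ws w) (pv_pairwise_pvP ws w)])]
  -- step 4: a loop with two independent additive accumulators is two sums
  rw [PySem.List.foldl_prod_mk
    (f := fun (a : Int) w => a + ((pvP ws w).map (fun p => if p + 1 ∈ pvP ws w then (1:Int) else 0)).sum)
    (g := fun (b : Int) w => b + ((pvP ws w).map (fun p =>
      (if p + 2 ∈ pvP ws w then (1:Int) else 0) + (if p + 3 ∈ pvP ws w then (1:Int) else 0))).sum)]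
  rw [PySem.List.foldl_add, PySem.List.foldl_add]
  -- step 5: the totalled membership sums are the distance-d counts
  have e1 : ((PySem.Set.ofList ws).map (fun w =>
      ((pvP ws w).map (fun p => if p + 1 ∈ pvP ws w then (1:Int) else 0)).sum)).sum
      = (pvRC ws 1 : Int) := by
    have := pv_sum_d ws 1
    simpa using this
  have e23 : ((PySem.Set.ofList ws).map (fun w =>
      ((pvP ws w).map (fun p =>
        (if p + 2 ∈ pvP ws w then (1:Int) else 0) + (if p + 3 ∈ pvP ws w then (1:Int) else 0))).sum)).sum
      = (pvRC ws 2 : Int) + (pvRC ws 3 : Int) := by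
    have hsplit : ∀ w, ((pvP ws w).map (fun p =>
        (if p + 2 ∈ pvP ws w then (1:Int) else 0) + (if p + 3 ∈ pvP ws w then (1:Int) else 0))).sum
        = ((pvP ws w).map (fun p => if p + 2 ∈ pvP ws w then (1:Int) else 0)).sum
        + ((pvP ws w).map (fun p => if p + 3 ∈ pvP ws w then (1:Int) else 0)).sum := by
      intro w
      rw [PySem.List.sum_map_add_int]
    simp only [hsplit]
    rw [PySem.List.sum_map_add_int]
    have h2 := pv_sum_d ws 2
    have h3 := pv_sum_d ws 3
    have c2 : ((2:Nat):Int) = (2:Int) := by norm_num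
    have c3 : ((3:Nat):Int) = (3:Int) := by norm_num
    rw [c2] at h2
    rw [c3] at h3
    rw [h2, h3]
  rw [e1, e23]
  norm_num

-- ===== VERDICT (by name: the statement is the Claim_ definition above) =====
theorem detect_repetitions_py_spec : Claim_equal_detect_repetitions_py := by
  intro ws _
  unfold Spec_detect_repetitions_py
  rw [pv_A_eq, pv_B_eq]
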